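-- pv_equiv track=rewrite | github.com/ferrine/OC16 | rassadka_modules/auditory.py | _eval_map_conditions
-- ===== SOURCE A (Python) =====
-- def _eval_map_conditions(school, klass) -> dict:
--     """
--     Преобразовывает входные диапазоны в вид,
--     подготовленный для единообразной проверки
--     *пока что буду считать, что там,
--     где проверяется школа, должен проверяться и город
--     :type school: set
--     :type klass: set
--     """
--     klass_school_town = school & klass
--     sc_and_town_only = school - klass_school_town
--     kl_only = klass - klass_school_town
--     res = dict()
--     for dyx in klass_school_town:
--         res[dyx] = {"klass": True, "school": True, "town": True}
--     for dyx in sc_and_town_only: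
--         res[dyx] = {"klass": False, "school": True, "town": True}
--     for dyx in kl_only:
--         res[dyx] = {"klass": True, "school": False, "town": False}
--     return res
-- ===== SOURCE B (Python) =====
-- def _eval_map_conditions(school, klass) -> dict:
--     """Tag each element with a 2-bit membership mask (bit0 = school, bit1 = klass),
--     then emit the result table-driven, grouped by mask value; no set algebra."""
--     TABLE = {3: {"klass": True, "school": True, "town": True},
--              1: {"klass": False, "school": True, "town": True},
--              2: {"klass": True, "school": False, "town": False}}
--     mask = {}
--     for dyx in school:
--         mask[dyx] = 1
--     for dyx in klass:
--         mask[dyx] = mask.get(dyx, 0) + 2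
--     res = {}
--     for want, cond in TABLE.items():
--         for dyx, m in mask.items():
--             if m == want:
--                 res[dyx] = cond
--     return res
-- ===== Notes on version B (the rewrite author's own statement) =====
-- stated objective: alternative
-- what changed: Instead of set algebra (intersection and two differences, then three loops over those sets), B tags every element with a 2-bit membership mask in a dict (bit0 = school, bit1 = klass) and then emits the result table-driven, scanning the mask dict once per mask value; no intersection/difference set is ever built.
import Mathlib
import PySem

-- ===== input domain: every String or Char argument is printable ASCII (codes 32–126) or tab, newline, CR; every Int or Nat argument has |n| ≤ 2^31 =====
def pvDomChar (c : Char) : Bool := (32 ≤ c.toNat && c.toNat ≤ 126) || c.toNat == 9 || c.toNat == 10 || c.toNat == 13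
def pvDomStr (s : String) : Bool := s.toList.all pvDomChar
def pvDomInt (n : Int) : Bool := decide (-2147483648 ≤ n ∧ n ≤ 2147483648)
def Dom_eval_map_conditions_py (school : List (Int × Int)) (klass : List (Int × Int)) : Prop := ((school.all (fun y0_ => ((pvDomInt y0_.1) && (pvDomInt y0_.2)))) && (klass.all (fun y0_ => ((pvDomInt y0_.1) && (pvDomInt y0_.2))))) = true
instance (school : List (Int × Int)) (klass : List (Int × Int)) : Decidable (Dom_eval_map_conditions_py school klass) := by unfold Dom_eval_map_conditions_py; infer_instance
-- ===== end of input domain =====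

-- B replaces A's set algebra (intersection + two differences, then three loops over those sets)
-- by a 2-bit membership-mask dict (bit0 = school, bit1 = klass) emitted table-driven, one scan per mask value.
-- Equivalence is about the returned dict; neither version mutates its arguments.
-- Python's hash iteration order over sets is not modelled; the dict result is order-insensitive for the caller.

-- the three condition dicts (shared literal data)
def pvCondBoth : List (String × Bool) := [("klass", true), ("school", true), ("town", true)]
def pvCondSchool : List (String × Bool) := [("klass", false), ("school", true), ("town", true)]
def pvCondKlass : List (String × Bool) := [("klass", true), ("school", false), ("town", false)]

-- flatten ((a,b),v) entries of the dict to the required triple shape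
def pvFlatten (d : PySem.Dict (Int × Int) (List (String × Bool))) : List (Int × Int × List (String × Bool)) :=
  d.items.map (fun p => (p.1.1, p.1.2, p.2))

-- ===== PORT A =====
def eval_map_conditions_py (school : List (Int × Int)) (klass : List (Int × Int)) : List (Int × Int × List (String × Bool)) :=
  let klass_school_town := PySem.Set.inter school klass
  let sc_and_town_only := PySem.Set.diff school klass_school_town
  let kl_only := PySem.Set.diff klass klass_school_town
  let res : PySem.Dict (Int × Int) (List (String × Bool)) := PySem.Dict.empty
  let res := klass_school_town.foldl (fun d dyx => d.insert dyx pvCondBoth) res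
  let res := sc_and_town_only.foldl (fun d dyx => d.insert dyx pvCondSchool) res
  let res := kl_only.foldl (fun d dyx => d.insert dyx pvCondKlass) res
  pvFlatten res

-- ===== PORT B =====
def eval_map_conditions_py_alt (school : List (Int × Int)) (klass : List (Int × Int)) : List (Int × Int × List (String × Bool)) :=
  let table : PySem.Dict Int (List (String × Bool)) :=
    PySem.Dict.ofList [(3, pvCondBoth), (1, pvCondSchool), (2, pvCondKlass)]
  let mask : PySem.Dict (Int × Int) Int :=
    school.foldl (fun d dyx => d.insert dyx 1) PySem.Dict.empty
  let mask := klass.foldl (fun d dyx => d.insert dyx (d.getD dyx 0 + 2)) mask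
  let res := table.items.foldl
    (fun r wc => mask.items.foldl
      (fun r p => if p.2 == wc.1 then r.insert p.1 wc.2 else r) r)
    PySem.Dict.empty
  pvFlatten res

-- ===== PRECONDITION & SPEC =====
-- A's parameters are Python sets ('school & klass'); a set is modelled as a duplicate-free list,
-- so Pre_ states exactly that shape — no input of A is excluded.
def Pre_eval_map_conditions_py (school : List (Int × Int)) (klass : List (Int × Int)) : Prop :=
  school.Nodup ∧ klass.Nodup
instance (school : List (Int × Int)) (klass : List (Int × Int)) : Decidable (Pre_eval_map_conditions_py school klass) := by unfold Pre_eval_map_conditions_py; infer_instance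

def pvWitness_eval_map_conditions_py : (List (Int × Int)) × (List (Int × Int)) :=
  ([(1, 2), (3, 4)], [(1, 2), (5, 6)])

def Spec_eval_map_conditions_py (school : List (Int × Int)) (klass : List (Int × Int)) (out : List (Int × Int × List (String × Bool))) : Prop := out = eval_map_conditions_py_alt school klass
instance (school : List (Int × Int)) (klass : List (Int × Int)) (out : List (Int × Int × List (String × Bool))) : Decidable (Spec_eval_map_conditions_py school klass out) := by unfold Spec_eval_map_conditions_py; infer_instance

-- ===== CLAIM =====
def Claim_equal_eval_map_conditions_py : Prop := ∀ (school : List (Int × Int)) (klass : List (Int × Int)), Dom_eval_map_conditions_py school klass → Pre_eval_map_conditions_py school klass → Spec_eval_map_conditions_py school klass (eval_map_conditions_py school klass)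

-- ===== LEMMAS AND PROOFS =====

-- B's second pass: or-ing (here: adding) bit 2 into the mask dict
theorem pv_mask_fold (K : List (Int × Int)) (hK : K.Nodup) :
    ∀ (d : PySem.Dict (Int × Int) Int), d.keys.Nodup →
    (K.foldl (fun d x => d.insert x (d.getD x 0 + 2)) d).items
      = d.items.map (fun p => if p.1 ∈ K then (p.1, p.2 + 2) else p)
        ++ (K.filter (fun x => !d.contains x)).map (fun x => (x, (2 : Int))) := by
  induction K with
  | nil => intro d _; simp
  | cons x xs ih =>
    intro d hd
    obtain ⟨hx, hxs⟩ := List.nodup_cons.mp hK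
    rw [List.foldl_cons]
    have hfiltgen : ∀ (v : Int), xs.filter (fun y => !(d.insert x v).contains y)
        = xs.filter (fun y => !d.contains y) := by
      intro v
      apply List.filter_congr
      intro y hy
      have hyx : (y == x) = false := by
        simp only [beq_eq_false_iff_ne]
        exact fun h => hx (h ▸ hy)
      simp [PySem.Dict.contains_insert, hyx]
    by_cases hc : d.contains x = true
    · rw [ih hxs (d.insert x (d.getD x 0 + 2))
        (by rw [PySem.Dict.keys_insert_of_contains d _ hc]; exact hd)]
      rw [PySem.Dict.items_insert_of_contains d _ hc]
      rw [List.map_map]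
      rw [hfiltgen]
      rw [List.filter_cons, if_neg (by simp [hc])]
      congr 1
      apply List.map_congr_left
      intro p hp
      by_cases hpx : p.1 = x
      · have hp' : (x, p.2) ∈ d.items := by rw [← hpx]; simpa using hp
        have hval : p.2 = d.getD x 0 :=
          (PySem.Dict.getD_of_mem_items d hp' hd 0).symm
        simp [Function.comp_apply, hpx, hx, hval]
      · have hmx : (p.1 ∈ x :: xs) ↔ p.1 ∈ xs := by simp [hpx]
        by_cases hmem : p.1 ∈ xs <;>
          simp [Function.comp_apply, hpx, hmx, hmem]
    · rw [ih hxs (d.insert x (d.getD x 0 + 2))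
        (by rw [PySem.Dict.keys_insert_of_not_contains d _ (by simpa using hc)]
            have hxk : x ∉ d.keys := fun h => hc ((PySem.Dict.contains_iff_mem_keys d x).mpr h)
            simp only [List.nodup_append, hd, List.nodup_singleton, true_and]
            intro a ha b hb
            rw [List.mem_singleton] at hb
            exact fun h => hxk (hb ▸ h ▸ ha))]
      rw [PySem.Dict.items_insert_of_not_contains d _ (by simpa using hc)]
      rw [PySem.Dict.getD_of_not_contains d _ (by simpa using hc)]
      rw [List.map_append, hfiltgen]
      rw [List.filter_cons, if_pos (by simp [hc])]
      have hmapx : [(x, (0 : Int) + 2)].map (fun p => if p.1 ∈ xs then (p.1, p.2 + 2) else p)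
          = [(x, (2 : Int))] := by simp [hx]
      rw [hmapx]
      have hmapd : d.items.map (fun p => if p.1 ∈ xs then (p.1, p.2 + 2) else p)
          = d.items.map (fun p => if p.1 ∈ x :: xs then (p.1, p.2 + 2) else p) := by
        apply List.map_congr_left
        intro p hp
        have hpx : p.1 ≠ x := fun h =>
          hc ((PySem.Dict.contains_iff_mem_keys d x).mpr
            (h ▸ PySem.Dict.mem_keys_of_mem_items d hp))
        simp [List.mem_cons, hpx]
      rw [hmapd]
      simp

-- one table-driven emission pass of B: fold-with-guard = fold over the filtered items, which appends fresh keys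
theorem pv_emit (L : List ((Int × Int) × Int)) (w : Int) (c : List (String × Bool))
    (r : PySem.Dict (Int × Int) (List (String × Bool)))
    (hfresh : ∀ p ∈ L, (p.2 == w) = true → r.contains p.1 = false)
    (hnd : ((L.filter (fun p => p.2 == w)).map (fun p => p.1)).Nodup) :
    (L.foldl (fun r p => if p.2 == w then r.insert p.1 c else r) r).items
      = r.items ++ (L.filter (fun p => p.2 == w)).map (fun p => (p.1, c)) := by
  rw [← List.foldl_filter]
  exact PySem.Dict.items_foldl_insert_fresh (L.filter (fun p => p.2 == w))
    (fun p => p.1) (fun _ => c) r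
    (fun p hp => hfresh p (List.mem_filter.mp hp).1 (List.mem_filter.mp hp).2) hnd

-- membership in the intersection list, for elements of the base list
theorem pv_contains_inter_left {x : Int × Int} {S K : List (Int × Int)} (hx : x ∈ S) :
    (S.filter (fun y => K.contains y)).contains x = K.contains x := by
  simp [List.contains_eq_mem, List.mem_filter, hx]

theorem pv_contains_inter_right {x : Int × Int} {S K : List (Int × Int)} (hx : x ∈ K) :
    (S.filter (fun y => K.contains y)).contains x = S.contains x := by
  simp [List.contains_eq_mem, List.mem_filter, hx]

theorem eval_map_conditions_py_spec : Claim_equal_eval_map_conditions_py := by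
  intro S K _ hpre
  obtain ⟨hS, hK⟩ := hpre
  unfold Spec_eval_map_conditions_py eval_map_conditions_py eval_map_conditions_py_alt
  dsimp only
  -- canonical pieces
  set SK := S.filter (fun x => K.contains x) with hSKdef
  set Sonly := S.filter (fun x => !K.contains x) with hSodef
  set Konly := K.filter (fun x => !S.contains x) with hKodef
  have hSKnd : SK.Nodup := hS.filter _
  have hSond : Sonly.Nodup := hS.filter _
  have hKond : Konly.Nodup := hK.filter _
  -- ===== A side =====
  have hinter : PySem.Set.inter S K = SK := rfl
  rw [hinter]
  have hdiffS : PySem.Set.diff S SK = Sonly := by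
    rw [hSKdef, hSodef]
    unfold PySem.Set.diff
    simp only [PySem.Set.contains]
    apply List.filter_congr
    intro x hx
    rw [pv_contains_inter_left hx]
  have hdiffK : PySem.Set.diff K SK = Konly := by
    rw [hSKdef, hKodef]
    unfold PySem.Set.diff
    simp only [PySem.Set.contains]
    apply List.filter_congr
    intro x hx
    rw [pv_contains_inter_right hx]
  rw [hdiffS, hdiffK]
  have hA1 : ((SK.foldl (fun d dyx => d.insert dyx pvCondBoth) PySem.Dict.empty)).items
      = SK.map (fun x => (x, pvCondBoth)) := by
    simpa using PySem.Dict.items_foldl_insert_fresh SK (fun a => a) (fun _ => pvCondBoth)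
      PySem.Dict.empty (fun a _ => PySem.Dict.contains_empty a) (by simpa using hSKnd)
  have hA1k : ((SK.foldl (fun d dyx => d.insert dyx pvCondBoth) PySem.Dict.empty)).keys = SK := by
    simp [PySem.Dict.keys, hA1, Function.comp_def]
  have hA2 : ((Sonly.foldl (fun d dyx => d.insert dyx pvCondSchool)
        (SK.foldl (fun d dyx => d.insert dyx pvCondBoth) PySem.Dict.empty))).items
      = SK.map (fun x => (x, pvCondBoth)) ++ Sonly.map (fun x => (x, pvCondSchool)) := by
    rw [PySem.Dict.items_foldl_insert_fresh Sonly (fun a => a) (fun _ => pvCondSchool) _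
      (fun a ha => by
        rw [PySem.Dict.contains_eq_decide_mem_keys, hA1k]
        rw [hSodef] at ha
        rw [hSKdef]
        simp only [List.mem_filter] at ha ⊢
        have hnk : a ∉ K := by simpa [List.contains_eq_mem] using ha.2
        simp [hnk])
      (by simpa using hSond), hA1]
  have hA2k : ((Sonly.foldl (fun d dyx => d.insert dyx pvCondSchool)
        (SK.foldl (fun d dyx => d.insert dyx pvCondBoth) PySem.Dict.empty))).keys
      = SK ++ Sonly := by
    simp [PySem.Dict.keys, hA2, Function.comp_def]
  have hA3 : ((Konly.foldl (fun d dyx => d.insert dyx pvCondKlass)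
        (Sonly.foldl (fun d dyx => d.insert dyx pvCondSchool)
          (SK.foldl (fun d dyx => d.insert dyx pvCondBoth) PySem.Dict.empty)))).items
      = SK.map (fun x => (x, pvCondBoth)) ++ Sonly.map (fun x => (x, pvCondSchool))
        ++ Konly.map (fun x => (x, pvCondKlass)) := by
    rw [PySem.Dict.items_foldl_insert_fresh Konly (fun a => a) (fun _ => pvCondKlass) _
      (fun a ha => by
        rw [PySem.Dict.contains_eq_decide_mem_keys, hA2k]
        rw [hKodef] at ha
        rw [hSKdef, hSodef]
        simp only [List.mem_filter, List.mem_append] at ha ⊢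
        have : a ∉ S := by
          have := ha.2
          simp [List.contains_eq_mem] at this
          exact this
        simp [this])
      (by simpa using hKond), hA2, List.append_assoc]
  rw [pvFlatten, hA3]
  -- ===== B side =====
  have hM1 : ((S.foldl (fun d dyx => d.insert dyx (1 : Int)) PySem.Dict.empty)).items
      = S.map (fun x => (x, (1 : Int))) := by
    simpa using PySem.Dict.items_foldl_insert_fresh S (fun a => a) (fun _ => (1 : Int))
      PySem.Dict.empty (fun a _ => PySem.Dict.contains_empty a) (by simpa using hS)
  have hM1k : ((S.foldl (fun d dyx => d.insert dyx (1 : Int)) PySem.Dict.empty)).keys = S := by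
    simp [PySem.Dict.keys, hM1, Function.comp_def]
  have hM2 : ((K.foldl (fun d dyx => d.insert dyx (d.getD dyx 0 + 2))
        (S.foldl (fun d dyx => d.insert dyx (1 : Int)) PySem.Dict.empty))).items
      = S.map (fun x => if x ∈ K then (x, (3 : Int)) else (x, (1 : Int)))
        ++ Konly.map (fun x => (x, (2 : Int))) := by
    have hKonly' : K.filter
        (fun x => !(S.foldl (fun d dyx => d.insert dyx (1 : Int)) PySem.Dict.empty).contains x)
        = Konly := by
      rw [hKodef]
      apply List.filter_congr
      intro x _
      rw [PySem.Dict.contains_eq_decide_mem_keys, hM1k]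
      simp [List.contains_eq_mem]
    rw [pv_mask_fold K hK _ (by rw [hM1k]; exact hS), hM1, List.map_map, hKonly']
    congr 1
  -- emission: three table-driven passes over the mask items
  set M := (K.foldl (fun d dyx => d.insert dyx (d.getD dyx 0 + 2))
        (S.foldl (fun d dyx => d.insert dyx (1 : Int)) PySem.Dict.empty)) with hMdef
  have htab : (PySem.Dict.ofList
        [((3 : Int), pvCondBoth), (1, pvCondSchool), (2, pvCondKlass)]).items
      = [((3 : Int), pvCondBoth), (1, pvCondSchool), (2, pvCondKlass)] := by rfl
  have hfull3 : M.items.filter (fun p => p.2 == (3 : Int)) = SK.map (fun x => (x, (3 : Int))) := by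
    rw [hM2, List.filter_append, List.filter_map, List.filter_map]
    have h1 : S.filter ((fun p => p.2 == (3 : Int)) ∘
        (fun x => if x ∈ K then (x, (3 : Int)) else (x, (1 : Int)))) = SK := by
      rw [hSKdef]
      apply List.filter_congr
      intro x _
      by_cases hxk : x ∈ K <;> simp [hxk, List.contains_eq_mem]
    have h2 : Konly.filter ((fun p => p.2 == (3 : Int)) ∘ (fun x => (x, (2 : Int)))) = [] := by
      simp [Function.comp_def]
    rw [h1, h2, List.map_nil, List.append_nil]
    apply List.map_congr_left
    intro x hx
    have hxk : x ∈ K := by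
      rw [hSKdef] at hx
      simpa [List.contains_eq_mem] using (List.mem_filter.mp hx).2
    simp [hxk]
  have hfull1 : M.items.filter (fun p => p.2 == (1 : Int)) = Sonly.map (fun x => (x, (1 : Int))) := by
    rw [hM2, List.filter_append, List.filter_map, List.filter_map]
    have h1 : S.filter ((fun p => p.2 == (1 : Int)) ∘
        (fun x => if x ∈ K then (x, (3 : Int)) else (x, (1 : Int)))) = Sonly := by
      rw [hSodef]
      apply List.filter_congr
      intro x _
      by_cases hxk : x ∈ K <;> simp [hxk, List.contains_eq_mem]
    have h2 : Konly.filter ((fun p => p.2 == (1 : Int)) ∘ (fun x => (x, (2 : Int)))) = [] := by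
      simp [Function.comp_def]
    rw [h1, h2, List.map_nil, List.append_nil]
    apply List.map_congr_left
    intro x hx
    have hxk : x ∉ K := by
      rw [hSodef] at hx
      simpa [List.contains_eq_mem] using (List.mem_filter.mp hx).2
    simp [hxk]
  have hfull2 : M.items.filter (fun p => p.2 == (2 : Int)) = Konly.map (fun x => (x, (2 : Int))) := by
    rw [hM2, List.filter_append, List.filter_map, List.filter_map]
    have h1 : S.filter ((fun p => p.2 == (2 : Int)) ∘
        (fun x => if x ∈ K then (x, (3 : Int)) else (x, (1 : Int)))) = [] := by
      rw [List.filter_eq_nil_iff]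
      intro x _
      by_cases hxk : x ∈ K <;> simp [hxk]
    have h2 : Konly.filter ((fun p => p.2 == (2 : Int)) ∘ (fun x => (x, (2 : Int)))) = Konly := by
      simp [Function.comp_def]
    rw [h1, h2, List.map_nil, List.nil_append]
  rw [htab]
  simp only [List.foldl_cons, List.foldl_nil]
  -- pass 1: want = 3
  have he3 : (M.items.foldl
        (fun r p => if p.2 == (3 : Int) then r.insert p.1 pvCondBoth else r) PySem.Dict.empty).items
      = SK.map (fun x => (x, pvCondBoth)) := by
    rw [pv_emit M.items 3 pvCondBoth PySem.Dict.empty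
      (fun p _ _ => PySem.Dict.contains_empty p.1)
      (by rw [hfull3]; simpa [List.map_map, Function.comp_def] using hSKnd), hfull3]
    simp [List.map_map, Function.comp_def, PySem.Dict.empty]
  have he3k : (M.items.foldl
        (fun r p => if p.2 == (3 : Int) then r.insert p.1 pvCondBoth else r) PySem.Dict.empty).keys
      = SK := by
    simp only [PySem.Dict.keys]
    rw [he3]
    simp [List.map_map, Function.comp_def]
  -- pass 2: want = 1
  have he1 : ((M.items.foldl
        (fun r p => if p.2 == (1 : Int) then r.insert p.1 pvCondSchool else r)
        (M.items.foldl
          (fun r p => if p.2 == (3 : Int) then r.insert p.1 pvCondBoth else r) PySem.Dict.empty))).items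
      = SK.map (fun x => (x, pvCondBoth)) ++ Sonly.map (fun x => (x, pvCondSchool)) := by
    rw [pv_emit M.items 1 pvCondSchool _
      (fun p hp hw => by
        have hpm : p ∈ M.items.filter (fun p => p.2 == (1 : Int)) := List.mem_filter.mpr ⟨hp, hw⟩
        rw [hfull1] at hpm
        obtain ⟨x, hxmem, rfl⟩ := List.mem_map.mp hpm
        rw [PySem.Dict.contains_eq_decide_mem_keys, he3k]
        rw [hSodef] at hxmem
        rw [hSKdef]
        have hxk : x ∉ K := by
          simpa [List.contains_eq_mem] using (List.mem_filter.mp hxmem).2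
        simp [List.mem_filter, List.contains_eq_mem, hxk])
      (by rw [hfull1]; simpa [List.map_map, Function.comp_def] using hSond), he3, hfull1]
    simp [List.map_map, Function.comp_def]
  have he1k : ((M.items.foldl
        (fun r p => if p.2 == (1 : Int) then r.insert p.1 pvCondSchool else r)
        (M.items.foldl
          (fun r p => if p.2 == (3 : Int) then r.insert p.1 pvCondBoth else r) PySem.Dict.empty))).keys
      = SK ++ Sonly := by
    simp only [PySem.Dict.keys]
    rw [he1]
    simp [List.map_map, Function.comp_def]
  -- pass 3: want = 2
  have he2 : ((M.items.foldl
        (fun r p => if p.2 == (2 : Int) then r.insert p.1 pvCondKlass else r)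
        (M.items.foldl
          (fun r p => if p.2 == (1 : Int) then r.insert p.1 pvCondSchool else r)
          (M.items.foldl
            (fun r p => if p.2 == (3 : Int) then r.insert p.1 pvCondBoth else r) PySem.Dict.empty)))).items
      = SK.map (fun x => (x, pvCondBoth)) ++ Sonly.map (fun x => (x, pvCondSchool))
        ++ Konly.map (fun x => (x, pvCondKlass)) := by
    rw [pv_emit M.items 2 pvCondKlass _
      (fun p hp hw => by
        have hpm : p ∈ M.items.filter (fun p => p.2 == (2 : Int)) := List.mem_filter.mpr ⟨hp, hw⟩
        rw [hfull2] at hpm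
        obtain ⟨x, hxmem, rfl⟩ := List.mem_map.mp hpm
        rw [PySem.Dict.contains_eq_decide_mem_keys, he1k]
        rw [hKodef] at hxmem
        rw [hSKdef, hSodef]
        have hxs : x ∉ S := by
          simpa [List.contains_eq_mem] using (List.mem_filter.mp hxmem).2
        simp [List.mem_append, List.mem_filter, hxs])
      (by rw [hfull2]; simpa [List.map_map, Function.comp_def] using hKond), he1, hfull2]
    simp [List.map_map, Function.comp_def, List.append_assoc]
  rw [pvFlatten, he2, List.append_assoc]
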